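-- pv_equiv track=rewrite | github.com/Adityashankar005/shankaraditya5 | app.py | filter_paragraphs
-- ===== SOURCE A (Python) =====
-- def filter_paragraphs(paragraphs, keywords, min_len=50):
--     kws = [k.strip().lower() for k in keywords if k.strip()]
--     matched = []
--     for p in paragraphs:
--         if len(p) < min_len:
--             continue
--         low = p.lower()
--         if any(k in low for k in kws):
--             matched.append(p)
--     return matched
-- ===== SOURCE B (Python) =====
-- def _has_hit(low, kws):
--     # scan positions of low; at each position test every keyword as a prefix
--     for i in range(len(low) + 1):
--         tail = low[i:]
--         if any(tail.startswith(k) for k in kws):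
--             return True
--     return False
--
--
-- def filter_paragraphs(paragraphs, keywords, min_len=50):
--     kws = [k.strip().lower() for k in keywords if k.strip()]
--     matched = []
--     for p in paragraphs:
--         if len(p) >= min_len:
--             low = p.lower()
--             if _has_hit(low, kws):
--                 matched.append(p)
--     return matched
-- ===== Notes on version B (the rewrite author's own statement) =====
-- stated objective: alternative
-- what changed: Replaces the per-keyword substring search (k in low) by a single left-to-right scan over the positions of the lowered paragraph, testing each keyword as a prefix of the current suffix and stopping at the first hit.
import Mathlib
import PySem

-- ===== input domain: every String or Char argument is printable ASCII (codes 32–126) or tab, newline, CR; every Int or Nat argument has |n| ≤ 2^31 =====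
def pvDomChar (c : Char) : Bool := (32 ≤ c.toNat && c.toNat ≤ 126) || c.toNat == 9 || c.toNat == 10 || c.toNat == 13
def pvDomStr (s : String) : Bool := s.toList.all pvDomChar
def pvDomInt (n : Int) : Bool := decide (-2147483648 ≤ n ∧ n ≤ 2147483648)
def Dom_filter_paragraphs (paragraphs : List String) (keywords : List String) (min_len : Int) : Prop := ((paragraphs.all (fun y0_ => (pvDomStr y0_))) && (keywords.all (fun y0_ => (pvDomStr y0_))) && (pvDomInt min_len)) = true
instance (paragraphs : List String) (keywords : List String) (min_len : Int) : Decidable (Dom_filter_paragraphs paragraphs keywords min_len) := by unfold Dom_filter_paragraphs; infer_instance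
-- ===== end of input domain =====

-- B replaces the per-keyword substring search by a single scan over the positions of the
-- lowered paragraph, testing each keyword as a prefix of the current suffix (alternative, same result).
-- shared keyword preprocessing: [k.strip().lower() for k in keywords if k.strip()] (identical in A and B)
def pvKws (keywords : List String) : List String :=
  (keywords.filter (fun k => PySem.Str.strip k ≠ "")).map
    (fun k => PySem.Str.lower (PySem.Str.strip k))

-- ===== PORT A =====
def filter_paragraphs (paragraphs : List String) (keywords : List String) (min_len : Int) : List String :=
  paragraphs.foldl (fun matched p =>
    if PySem.Str.len p < min_len then matched
    else
      let low := PySem.Str.lower p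
      if (pvKws keywords).any (fun k => PySem.Str.isIn k low) then matched ++ [p] else matched) []

-- ===== PORT B =====
-- _has_hit: scan the suffixes of low (positions i = 0,1,…), testing each keyword as a prefix
def pvHasHit (low : List Char) (kws : List String) : Bool :=
  if kws.any (fun k => PySem.Chars.startswith low k.toList) then true
  else
    match low with
    | [] => false
    | _ :: rest => pvHasHit rest kws

def filter_paragraphs_alt (paragraphs : List String) (keywords : List String) (min_len : Int) : List String :=
  paragraphs.foldl (fun matched p =>
    if min_len ≤ PySem.Str.len p then
      let low := PySem.Str.lower p
      if pvHasHit low.toList (pvKws keywords) then matched ++ [p] else matched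
    else matched) []

-- ===== PRECONDITION & SPEC =====
def Spec_filter_paragraphs (paragraphs : List String) (keywords : List String) (min_len : Int) (out : List String) : Prop := out = filter_paragraphs_alt paragraphs keywords min_len
instance (paragraphs : List String) (keywords : List String) (min_len : Int) (out : List String) : Decidable (Spec_filter_paragraphs paragraphs keywords min_len out) := by unfold Spec_filter_paragraphs; infer_instance

-- ===== CLAIM (what is proved, stated in full; the proofs are below) =====
def Claim_equal_filter_paragraphs : Prop := ∀ (paragraphs : List String) (keywords : List String) (min_len : Int), Dom_filter_paragraphs paragraphs keywords min_len → Spec_filter_paragraphs paragraphs keywords min_len (filter_paragraphs paragraphs keywords min_len)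

-- ===== LEMMAS AND PROOFS =====

-- the position scan finds a hit iff some keyword is an infix of low
theorem pvHasHit_iff (low : List Char) (kws : List String) :
    pvHasHit low kws = true ↔ ∃ k ∈ kws, k.toList <:+: low := by
  induction low with
  | nil =>
    rw [pvHasHit]
    simp [PySem.Chars.startswith_iff, List.prefix_nil, List.infix_nil]
  | cons c rest ih =>
    rw [pvHasHit]
    by_cases h : kws.any (fun k => PySem.Chars.startswith (c :: rest) k.toList) = true
    · simp only [h, if_true, true_iff]
      rcases List.any_eq_true.mp h with ⟨k, hk, hpre⟩
      exact ⟨k, hk, ((PySem.Chars.startswith_iff _ _).mp hpre).isInfix⟩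
    · rw [if_neg h, ih]
      constructor
      · rintro ⟨k, hk, hinf⟩
        exact ⟨k, hk, hinf.trans ((rest.suffix_cons c).isInfix)⟩
      · rintro ⟨k, hk, hinf⟩
        rcases (List.infix_cons_iff).mp hinf with hpre | htail
        · exact absurd (List.any_eq_true.mpr ⟨k, hk, (PySem.Chars.startswith_iff _ _).mpr hpre⟩) h
        · exact ⟨k, hk, htail⟩

-- per-paragraph, B's branch agrees with A's
theorem pvStep_eq (kws : List String) (min_len : Int) (matched : List String) (p : String) :
    (if min_len ≤ PySem.Str.len p then
      if pvHasHit (PySem.Str.lower p).toList kws then matched ++ [p] else matched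
     else matched)
    = (if PySem.Str.len p < min_len then matched
       else if kws.any (fun k => PySem.Str.isIn k (PySem.Str.lower p)) then matched ++ [p]
       else matched) := by
  have hcond : pvHasHit (PySem.Str.lower p).toList kws
      = kws.any (fun k => PySem.Str.isIn k (PySem.Str.lower p)) := by
    rw [Bool.eq_iff_iff, pvHasHit_iff, List.any_eq_true]
    constructor
    · rintro ⟨k, hk, hinf⟩
      exact ⟨k, hk, (PySem.Str.isIn_iff_infix _ _).mpr hinf⟩
    · rintro ⟨k, hk, hin⟩
      exact ⟨k, hk, (PySem.Str.isIn_iff_infix _ _).mp hin⟩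
  rw [hcond]
  by_cases hlt : PySem.Str.len p < min_len
  · rw [if_neg (by omega), if_pos hlt]
  · rw [if_pos (by omega), if_neg hlt]

-- ===== VERDICT (by name: the statement is the Claim_ definition above) =====
theorem filter_paragraphs_spec : Claim_equal_filter_paragraphs := by
  intro paragraphs keywords min_len _
  show filter_paragraphs paragraphs keywords min_len
      = filter_paragraphs_alt paragraphs keywords min_len
  unfold filter_paragraphs filter_paragraphs_alt
  rw [funext (fun matched => funext (fun p => pvStep_eq (pvKws keywords) min_len matched p))]
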